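-- pv_equiv track=rewrite | github.com/nuanced-dev/nuanced | src/nuanced_graph/parse_symbol.py | parse_escaped_token
-- ===== SOURCE A (Python) =====
-- def parse_escaped_token(s, pos):
--     token = []
--     while pos < len(s):
--         if s[pos] == " ":
--             if pos + 1 < len(s) and s[pos + 1] == " ":
--                 token.append(" ")
--                 pos += 2
--             else:
--                 break
--         else:
--             token.append(s[pos])
--             pos += 1
--     return "".join(token), pos
-- ===== SOURCE B (Python) =====
-- def parse_escaped_token(s, pos):
--     # Split the tail on doubled spaces: each separator is one escaped space of the
--     # token; the token ends at the first lone space (inside a part) or at the end.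
--     parts = s[pos:].split("  ")
--     out = []
--     n = pos
--     first = True
--     for p in parts:
--         if not first:
--             n += 2
--         first = False
--         i = p.find(" ")
--         if i >= 0:
--             out.append(p[:i])
--             n += i
--             break
--         out.append(p)
--         n += len(p)
--     return " ".join(out), n
-- ===== Notes on version B (the rewrite author's own statement) =====
-- stated objective: alternative
-- what changed: Replaces A's per-character scanning loop with a span-then-transform formulation: split the tail on doubled spaces, consume whole parts until one contains a lone space, and rejoin the consumed parts with single spaces, tracking the end position arithmetically; the per-character work moves into C-level str.split/find/join, which a timing run measured as markedly faster.
-- outside the precondition, e.g. on parse_escaped_token('ab', -1): A returns ('bab', 2), B returns ('b', 0); on parse_escaped_token('a', -5): A raises IndexError, B returns ('a', -4)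
import Mathlib
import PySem

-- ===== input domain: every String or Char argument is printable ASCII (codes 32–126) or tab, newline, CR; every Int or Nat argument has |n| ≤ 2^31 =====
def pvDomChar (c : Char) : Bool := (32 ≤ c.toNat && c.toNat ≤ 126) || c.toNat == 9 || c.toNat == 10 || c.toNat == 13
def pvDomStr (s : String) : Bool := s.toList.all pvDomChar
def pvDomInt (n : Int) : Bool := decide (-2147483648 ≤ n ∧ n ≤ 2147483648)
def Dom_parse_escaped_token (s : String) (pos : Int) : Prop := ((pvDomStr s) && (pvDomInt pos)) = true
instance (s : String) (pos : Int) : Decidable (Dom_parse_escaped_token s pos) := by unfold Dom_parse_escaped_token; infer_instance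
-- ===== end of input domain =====

-- B replaces A's per-character scan with split-on-"  " / rejoin-with-" "; equivalence is
-- claimed for pos ≥ 0 (see Pre_ below).

-- ===== PORT A =====
-- A's while loop: consume a non-space, or a doubled space (as one escaped space);
-- stop at a lone space or the end.  token is accumulated in reverse, joined at the end.
def parse_escaped_token_loop (cs : List Char) (pos : Int) (token : List Char) :
    List Char × Int :=
  if _h : pos < (cs.length : Int) then
    match PySem.List.pyGet? cs pos with
    | none => (token.reverse, pos)  -- Python raises IndexError here (pos < -len); outside Pre_
    | some c =>
      if c = ' ' then
        if _h2 : pos + 1 < (cs.length : Int) ∧ PySem.List.pyGet? cs (pos + 1) = some ' ' then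
          parse_escaped_token_loop cs (pos + 2) (' ' :: token)
        else
          (token.reverse, pos)
      else
        parse_escaped_token_loop cs (pos + 1) (c :: token)
  else (token.reverse, pos)
termination_by ((cs.length : Int) - pos).toNat
decreasing_by all_goals (simp at *; omega)

def parse_escaped_token (s : String) (pos : Int) : String × Int :=
  let r := parse_escaped_token_loop s.toList pos []
  (String.ofList r.1, r.2)  -- "".join(token)

-- ===== PORT B =====
-- B's for-loop over parts = s[pos:].split("  "): each earlier separator adds 2 to n,
-- a part containing a lone space ends the token (break), otherwise the whole part is kept.
def parse_escaped_token_alt_loop (parts : List (List Char)) (first : Bool)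
    (out : List (List Char)) (n : Int) : List (List Char) × Int :=
  match parts with
  | [] => (out.reverse, n)
  | p :: rest =>
    let n' : Int := if first then n else n + 2
    let i := PySem.Chars.find p [' ']
    if 0 ≤ i then
      ((p.take i.toNat :: out).reverse, n' + i)          -- out.append(p[:i]); break
    else
      parse_escaped_token_alt_loop rest false (p :: out) (n' + p.length)

def parse_escaped_token_alt (s : String) (pos : Int) : String × Int :=
  let tail := (PySem.Str.slice s (some pos) none).toList         -- s[pos:]
  let parts := PySem.Chars.splitOn tail [' ', ' ']               -- .split("  ")
  let r := parse_escaped_token_alt_loop parts true [] pos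
  (String.ofList (PySem.Chars.join [' '] r.1), r.2)                  -- " ".join(out)

-- ===== PRECONDITION & SPEC =====
-- Pre_ excludes negative pos, which is outside the natural domain of this position-based
-- parser: there A re-reads characters through Python's negative-index wraparound (e.g.
-- ("ab", -1)) or raises IndexError (pos < -len(s)), while B reads s[pos:] as a slice.
def Pre_parse_escaped_token (_s : String) (pos : Int) : Prop := 0 ≤ pos
instance (s : String) (pos : Int) : Decidable (Pre_parse_escaped_token s pos) := by
  unfold Pre_parse_escaped_token; infer_instance

def pvWitness_parse_escaped_token : String × Int := ("ab  cd e", 0)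

def Spec_parse_escaped_token (s : String) (pos : Int) (out : String × Int) : Prop :=
  out = parse_escaped_token_alt s pos
instance (s : String) (pos : Int) (out : String × Int) :
    Decidable (Spec_parse_escaped_token s pos out) := by
  unfold Spec_parse_escaped_token; infer_instance

-- ===== CLAIM (what is proved, stated in full; the proofs are below) =====
def Claim_equal_parse_escaped_token : Prop :=
  ∀ (s : String) (pos : Int), Dom_parse_escaped_token s pos →
    Pre_parse_escaped_token s pos →
    Spec_parse_escaped_token s pos (parse_escaped_token s pos)

-- ===== LEMMAS AND PROOFS =====

-- The common specification of both programs on the tail t = s[pos:]: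
-- pvTok t is the decoded token, pvSpan t the number of consumed characters,
-- pvPieces t the token piece-by-piece, as B's loop accumulates it.
def pvTok : List Char → List Char
  | ' ' :: ' ' :: r => ' ' :: pvTok r
  | ' ' :: _ => []
  | c :: r => c :: pvTok r
  | [] => []

def pvSpan : List Char → Nat
  | ' ' :: ' ' :: r => pvSpan r + 2
  | ' ' :: _ => 0
  | _ :: r => pvSpan r + 1
  | [] => 0

def pvPieces : List Char → List (List Char)
  | ' ' :: ' ' :: r => [] :: pvPieces r
  | ' ' :: _ => [[]]
  | c :: r => (pvPieces r).modifyHead (c :: ·)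
  | [] => [[]]

-- equation lemmas for the overlapping matches of pvTok / pvSpan / pvPieces
theorem pvTok_cons (c : Char) (hc : c ≠ ' ') (r : List Char) :
    pvTok (c :: r) = c :: pvTok r := by cases r <;> simp [pvTok, hc]

theorem pvSpan_cons (c : Char) (hc : c ≠ ' ') (r : List Char) :
    pvSpan (c :: r) = pvSpan r + 1 := by cases r <;> simp [pvSpan, hc]

theorem pvPieces_cons (c : Char) (hc : c ≠ ' ') (r : List Char) :
    pvPieces (c :: r) = (pvPieces r).modifyHead (c :: ·) := by
  cases r <;> simp [pvPieces, hc]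

theorem pvTok_lone (d : Char) (hd : d ≠ ' ') (r : List Char) :
    pvTok (' ' :: d :: r) = [] := by simp [pvTok, hd]

theorem pvSpan_lone (d : Char) (hd : d ≠ ' ') (r : List Char) :
    pvSpan (' ' :: d :: r) = 0 := by simp [pvSpan, hd]

theorem pvPieces_lone (d : Char) (hd : d ≠ ' ') (r : List Char) :
    pvPieces (' ' :: d :: r) = [[]] := by simp [pvPieces, hd]

theorem pvPieces_ne_nil (n : Nat) :
    ∀ t : List Char, t.length = n → pvPieces t ≠ [] := by
  induction n using Nat.strong_induction_on with
  | _ n ih =>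
    intro t hl
    cases t with
    | nil => simp [pvPieces]
    | cons c r =>
      by_cases hc : c = ' '
      · subst hc
        cases r with
        | nil => simp [pvPieces]
        | cons d r' =>
          by_cases hd : d = ' '
          · subst hd
            show pvPieces (' ' :: ' ' :: r') ≠ []
            simp [pvPieces]
          · rw [pvPieces_lone d hd r']; simp
      · rw [pvPieces_cons c hc r]
        have := ih r.length (by simp at hl; omega) r rfl
        cases hp : pvPieces r with
        | nil => exact absurd hp this
        | cons a as => simp

theorem pvTok_eq_join (n : Nat) :
    ∀ t : List Char, t.length = n →
    PySem.Chars.join [' '] (pvPieces t) = pvTok t := by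
  induction n using Nat.strong_induction_on with
  | _ n ih =>
    intro t hl
    cases t with
    | nil => decide
    | cons c r =>
      by_cases hc : c = ' '
      · subst hc
        cases r with
        | nil => decide
        | cons d r' =>
          by_cases hd : d = ' '
          · subst hd
            show PySem.Chars.join [' '] (pvPieces (' ' :: ' ' :: r')) = pvTok (' ' :: ' ' :: r')
            have hP : pvPieces (' ' :: ' ' :: r') = [] :: pvPieces r' := rfl
            have hT : pvTok (' ' :: ' ' :: r') = ' ' :: pvTok r' := rfl
            rw [hP, hT]
            obtain ⟨a, as, hp⟩ : ∃ a as, pvPieces r' = a :: as := by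
              cases hp : pvPieces r' with
              | nil => exact absurd hp (pvPieces_ne_nil r'.length r' rfl)
              | cons a as => exact ⟨a, as, rfl⟩
            rw [hp, PySem.Chars.join_cons_cons]
            have := ih r'.length (by simp at hl; omega) r' rfl
            rw [hp] at this
            simp [this]
          · rw [pvPieces_lone d hd r', pvTok_lone d hd r']
            simp [PySem.Chars.join_singleton]
      · rw [pvPieces_cons c hc r, pvTok_cons c hc r]
        obtain ⟨a, as, hp⟩ : ∃ a as, pvPieces r = a :: as := by
          cases hp : pvPieces r with
          | nil => exact absurd hp (pvPieces_ne_nil r.length r rfl)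
          | cons a as => exact ⟨a, as, rfl⟩
        have := ih r.length (by simp at hl; omega) r rfl
        rw [hp] at this ⊢
        simp only [List.modifyHead]
        cases as with
        | nil =>
          rw [PySem.Chars.join_singleton] at this
          rw [PySem.Chars.join_singleton]
          simp [this]
        | cons b bs =>
          rw [PySem.Chars.join_cons_cons] at this
          rw [PySem.Chars.join_cons_cons]
          simp [← this]

-- ---- A's loop computes pvTok / pvSpan ----
theorem loopA_spec (cs : List Char) (n : Nat) :
    ∀ (p : Nat) (acc : List Char), cs.length - p ≤ n →
    parse_escaped_token_loop cs (p : Int) acc =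
      (acc.reverse ++ pvTok (cs.drop p), (p : Int) + pvSpan (cs.drop p)) := by
  induction n with
  | zero =>
    intro p acc hn
    have hp : cs.length ≤ p := by omega
    rw [parse_escaped_token_loop]
    rw [dif_neg (by exact_mod_cast not_lt.mpr hp)]
    simp [List.drop_of_length_le hp, pvTok, pvSpan]
  | succ m ih =>
    intro p acc hn
    by_cases hp : p < cs.length
    · rw [parse_escaped_token_loop, dif_pos (by exact_mod_cast hp)]
      rw [PySem.List.pyGet?_natCast, List.getElem?_eq_getElem hp]
      dsimp only
      have hdp : cs.drop p = cs[p] :: cs.drop (p + 1) := List.drop_eq_getElem_cons hp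
      by_cases hc : cs[p] = ' '
      · rw [if_pos hc]
        have hcast1 : (p : Int) + 1 = ((p + 1 : Nat) : Int) := by push_cast; ring
        by_cases hlt : p + 1 < cs.length
        · by_cases hsp : cs[p + 1] = ' '
          · rw [dif_pos (by
              constructor
              · exact_mod_cast (by exact_mod_cast hlt : ((p:Int) + 1) < (cs.length : Int))
              · rw [hcast1, PySem.List.pyGet?_natCast, List.getElem?_eq_getElem hlt, hsp])]
            have hcast2 : (p : Int) + 2 = ((p + 2 : Nat) : Int) := by push_cast; ring
            have hrec : cs.length - (p + 2) ≤ m := by omega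
            rw [hcast2, ih (p + 2) (' ' :: acc) hrec]
            have hdp1 : cs.drop (p + 1) = cs[p + 1] :: cs.drop (p + 2) :=
              List.drop_eq_getElem_cons hlt
            rw [hdp, hdp1, hc, hsp]
            simp only [pvTok, pvSpan, Prod.mk.injEq]
            constructor
            · simp
            · push_cast; ring
          · rw [dif_neg (by
              intro ⟨h1, h2⟩
              rw [hcast1, PySem.List.pyGet?_natCast, List.getElem?_eq_getElem hlt] at h2
              exact hsp (by injection h2))]
            have hdp1 : cs.drop (p + 1) = cs[p + 1] :: cs.drop (p + 2) :=
              List.drop_eq_getElem_cons hlt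
            have htok : pvTok (cs.drop p) = [] ∧ pvSpan (cs.drop p) = 0 := by
              rw [hdp, hc, hdp1]
              exact ⟨pvTok_lone _ hsp _, pvSpan_lone _ hsp _⟩
            rw [htok.1, htok.2]
            simp
        · rw [dif_neg (by
            intro ⟨h1, _⟩
            exact hlt (by exact_mod_cast (hcast1 ▸ h1)))]
          have htok : pvTok (cs.drop p) = [] ∧ pvSpan (cs.drop p) = 0 := by
            rw [hdp, hc, List.drop_of_length_le (by omega : cs.length ≤ p + 1)]
            exact ⟨rfl, rfl⟩
          rw [htok.1, htok.2]
          simp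
      · rw [if_neg hc]
        have hcast1 : (p : Int) + 1 = ((p + 1 : Nat) : Int) := by push_cast; ring
        have hrec : cs.length - (p + 1) ≤ m := by omega
        rw [hcast1, ih (p + 1) (cs[p] :: acc) hrec]
        have h1 : pvTok (cs.drop p) = cs[p] :: pvTok (cs.drop (p + 1)) := by
          rw [hdp]; exact pvTok_cons _ hc _
        have h2 : pvSpan (cs.drop p) = pvSpan (cs.drop (p + 1)) + 1 := by
          rw [hdp]; exact pvSpan_cons _ hc _
        rw [h1, h2]
        simp only [Prod.mk.injEq]
        constructor
        · simp
        · push_cast; ring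
    · rw [parse_escaped_token_loop]
      rw [dif_neg (by exact_mod_cast not_lt.mpr (by omega : cs.length ≤ p))]
      simp [List.drop_of_length_le (by omega : cs.length ≤ p), pvTok, pvSpan]

-- ---- splitOn [' ', ' '] : recursion equations derived from the fuel-based go ----
theorem go_zero (sep l cur acc) : PySem.Chars.splitOn.go sep 0 l cur acc
    = ((cur.reverse ++ l) :: acc).reverse := by
  rw [PySem.Chars.splitOn.go]

theorem go_nil (sep f cur acc) : PySem.Chars.splitOn.go sep (f+1) [] cur acc
    = (cur.reverse :: acc).reverse := by
  rw [PySem.Chars.splitOn.go]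
  omega

theorem go_pre (sep f c rest cur acc) (h : sep.isPrefixOf (c :: rest) = true) :
    PySem.Chars.splitOn.go sep (f+1) (c :: rest) cur acc
    = PySem.Chars.splitOn.go sep f (List.drop sep.length (c :: rest)) [] (cur.reverse :: acc) := by
  rw [PySem.Chars.splitOn.go]; simp [h]

theorem go_no (sep f c rest cur acc) (h : ¬ sep.isPrefixOf (c :: rest) = true) :
    PySem.Chars.splitOn.go sep (f+1) (c :: rest) cur acc
    = PySem.Chars.splitOn.go sep f rest (c :: cur) acc := by
  rw [PySem.Chars.splitOn.go]; simp [h]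

theorem go_master (sep : List Char) (fuel : Nat) :
    ∀ (l cur : List Char) (acc : List (List Char)),
    PySem.Chars.splitOn.go sep fuel l cur acc =
      acc.reverse ++ (PySem.Chars.splitOn.go sep fuel l [] []).modifyHead (cur.reverse ++ ·) := by
  induction fuel with
  | zero =>
    intro l cur acc
    rw [go_zero, go_zero]
    simp
  | succ f ih =>
    intro l cur acc
    cases l with
    | nil => rw [go_nil, go_nil]; simp
    | cons c rest =>
      by_cases h : sep.isPrefixOf (c :: rest) = true
      · rw [go_pre sep f c rest cur acc h, go_pre sep f c rest [] [] h]
        rw [ih _ [] (cur.reverse :: acc), ih _ [] [[].reverse]]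
        cases hg : PySem.Chars.splitOn.go sep f (List.drop sep.length (c :: rest)) [] [] with
        | nil => simp
        | cons a as => simp
      · rw [go_no sep f c rest cur acc h, go_no sep f c rest [] [] h]
        rw [ih rest (c :: cur) acc, ih rest [c] []]
        cases hg : PySem.Chars.splitOn.go sep f rest [] [] with
        | nil => simp
        | cons a as => simp

theorem go_nil_fuel (sep : List Char) (f : Nat) (cur : List Char) (acc : List (List Char)) :
    PySem.Chars.splitOn.go sep f [] cur acc = (cur.reverse :: acc).reverse := by
  cases f with
  | zero => rw [go_zero]; simp
  | succ f => rw [go_nil]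

theorem go_fi (sep : List Char) (hsep : sep ≠ []) (n : Nat) :
    ∀ (f1 f2 : Nat) (l : List Char), l.length = n → n ≤ f1 → n ≤ f2 →
      PySem.Chars.splitOn.go sep f1 l [] [] = PySem.Chars.splitOn.go sep f2 l [] [] := by
  induction n using Nat.strong_induction_on with
  | _ n ih =>
    intro f1 f2 l hl h1 h2
    cases l with
    | nil => rw [go_nil_fuel, go_nil_fuel]
    | cons c rest =>
      obtain ⟨a, rfl⟩ : ∃ a, f1 = a + 1 := ⟨f1 - 1, by simp at hl; omega⟩
      obtain ⟨b, rfl⟩ : ∃ b, f2 = b + 1 := ⟨f2 - 1, by simp at hl; omega⟩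
      by_cases h : sep.isPrefixOf (c :: rest) = true
      · rw [go_pre sep a c rest [] [] h, go_pre sep b c rest [] [] h]
        rw [go_master sep a, go_master sep b]
        have hpre : sep <+: (c :: rest) := by rwa [← List.isPrefixOf_iff_prefix]
        have hlen : sep.length ≤ (c :: rest).length := hpre.length_le
        have h1' : 1 ≤ sep.length := by
          cases sep with | nil => exact absurd rfl hsep | cons _ _ => simp
        rw [ih (List.drop sep.length (c :: rest)).length (by simp at hl ⊢; omega)
              a b _ rfl (by simp at hl ⊢; omega) (by simp at hl ⊢; omega)]
      · rw [go_no sep a c rest [] [] h, go_no sep b c rest [] [] h]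
        rw [go_master sep a, go_master sep b]
        rw [ih rest.length (by simp at hl; omega) a b rest rfl
              (by simp at hl; omega) (by simp at hl; omega)]

theorem splitOn_def (sep l : List Char) :
    PySem.Chars.splitOn l sep = PySem.Chars.splitOn.go sep (l.length + 1) l [] [] := by
  rw [PySem.Chars.splitOn]

theorem splitOn_sep (r : List Char) :
    PySem.Chars.splitOn (' ' :: ' ' :: r) [' ', ' '] =
      [] :: PySem.Chars.splitOn r [' ', ' '] := by
  rw [splitOn_def, splitOn_def]
  have h : ([' ', ' '] : List Char).isPrefixOf (' ' :: ' ' :: r) = true := by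
    simp [List.isPrefixOf]
  rw [go_pre _ _ _ _ _ _ h]
  simp only [List.drop_succ_cons, List.drop_zero, List.length]
  rw [go_master]
  rw [go_fi [' ', ' '] (by simp) r.length (r.length + 1 + 1) (r.length + 1) r rfl (by omega) (by omega)]
  cases hg : PySem.Chars.splitOn.go [' ', ' '] (r.length + 1) r [] [] with
  | nil => simp
  | cons a as => simp

theorem splitOn_cons (c : Char) (r : List Char) (h : ¬ [' ', ' '] <+: (c :: r)) :
    PySem.Chars.splitOn (c :: r) [' ', ' '] =
      (PySem.Chars.splitOn r [' ', ' ']).modifyHead (c :: ·) := by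
  rw [splitOn_def, splitOn_def]
  have h' : ¬ ([' ', ' '] : List Char).isPrefixOf (c :: r) = true := by
    rwa [List.isPrefixOf_iff_prefix]
  rw [go_no _ _ _ _ _ _ h', go_master]
  simp only [List.length_cons]
  rfl

theorem splitOn_nil : PySem.Chars.splitOn [] [' ', ' '] = [[]] := by decide

theorem splitOn_ne_nil (n : Nat) :
    ∀ t : List Char, t.length = n → PySem.Chars.splitOn t [' ', ' '] ≠ [] := by
  induction n using Nat.strong_induction_on with
  | _ n ih =>
    intro t hl
    cases t with
    | nil => rw [splitOn_nil]; simp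
    | cons c r =>
      by_cases h : [' ', ' '] <+: (c :: r)
      · obtain ⟨u, hu⟩ := h
        obtain ⟨hc, hr⟩ : c = ' ' ∧ r = ' ' :: u := by
          simpa using congrArg (fun l => (l.head?, l.tail)) hu.symm
        subst hc; subst hr
        rw [splitOn_sep]
        simp
      · rw [splitOn_cons c r h]
        have := ih r.length (by simp at hl; omega) r rfl
        cases hp : PySem.Chars.splitOn r [' ', ' '] with
        | nil => exact absurd hp this
        | cons a as => simp

-- ---- find of a single space ----
theorem find_nil_sp : PySem.Chars.find [] [' '] = -1 := by decide

theorem find_head_sp (p0 : List Char) : PySem.Chars.find (' ' :: p0) [' '] = 0 := by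
  have h0 : (0:Int) ≤ PySem.Chars.find (' ' :: p0) [' '] := by
    rw [PySem.Chars.find_nonneg_iff]
    simp [List.singleton_infix_iff]
  obtain ⟨hpre, hmin⟩ := PySem.Chars.find_spec h0
  by_contra hne
  have : (0:Nat) < (PySem.Chars.find (' ' :: p0) [' ']).toNat := by omega
  exact hmin 0 this (by simp)

theorem find_cons_sp (c : Char) (hc : c ≠ ' ') (p0 : List Char) :
    PySem.Chars.find (c :: p0) [' '] =
      if 0 ≤ PySem.Chars.find p0 [' '] then PySem.Chars.find p0 [' '] + 1 else -1 := by
  by_cases hm : ' ' ∈ p0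
  · have h0 : (0:Int) ≤ PySem.Chars.find p0 [' '] := by
      rw [PySem.Chars.find_nonneg_iff, List.singleton_infix_iff]; exact hm
    have hF : (0:Int) ≤ PySem.Chars.find (c :: p0) [' '] := by
      rw [PySem.Chars.find_nonneg_iff, List.singleton_infix_iff]; simp [hm]
    obtain ⟨hpre0, hmin0⟩ := PySem.Chars.find_spec h0
    obtain ⟨hpreF, hminF⟩ := PySem.Chars.find_spec hF
    have hFne : (PySem.Chars.find (c :: p0) [' ']).toNat ≠ 0 := by
      intro h
      rw [h] at hpreF
      simp [List.cons_prefix_cons] at hpreF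
      exact hc hpreF.symm
    obtain ⟨k, hk1⟩ : ∃ k, (PySem.Chars.find (c :: p0) [' ']).toNat = k + 1 :=
      ⟨(PySem.Chars.find (c :: p0) [' ']).toNat - 1, by omega⟩
    rw [hk1, List.drop_succ_cons] at hpreF
    have hk : k = (PySem.Chars.find p0 [' ']).toNat := by
      rcases Nat.lt_trichotomy k (PySem.Chars.find p0 [' ']).toNat with h | h | h
      · exact absurd hpreF (hmin0 k h)
      · exact h
      · refine absurd hpre0 ?_
        have := hminF ((PySem.Chars.find p0 [' ']).toNat + 1) (by omega)
        rw [List.drop_succ_cons] at this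
        exact this
    rw [if_pos h0]
    omega
  · have h1 : PySem.Chars.find p0 [' '] = -1 := by
      rw [PySem.Chars.find_eq_neg_one_iff, List.singleton_infix_iff]; exact hm
    have h2 : PySem.Chars.find (c :: p0) [' '] = -1 := by
      rw [PySem.Chars.find_eq_neg_one_iff, List.singleton_infix_iff]
      simp [hm, Ne.symm hc]
    rw [h1, h2]; simp

-- ---- B's loop: frame lemma, first-flag shift, and the main invariant ----
theorem loopB_frame (parts : List (List Char)) :
    ∀ (first : Bool) (out : List (List Char)) (n : Int),
    parse_escaped_token_alt_loop parts first out n =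
      (out.reverse ++ (parse_escaped_token_alt_loop parts first [] 0).1,
       n + (parse_escaped_token_alt_loop parts first [] 0).2) := by
  induction parts with
  | nil => intro first out n; simp [parse_escaped_token_alt_loop]
  | cons p rest ih =>
    intro first out n
    rw [parse_escaped_token_alt_loop, parse_escaped_token_alt_loop]
    by_cases hi : 0 ≤ PySem.Chars.find p [' ']
    · simp only [hi, if_pos]
      cases first <;> simp [add_assoc]
    · simp only [hi, if_false]
      rw [ih false (p :: out), ih false [p]]
      cases first <;> simp [add_comm, add_assoc, add_left_comm]

theorem loopB_false (parts : List (List Char)) (hne : parts ≠ []) :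
    parse_escaped_token_alt_loop parts false [] 0 =
      ((parse_escaped_token_alt_loop parts true [] 0).1,
       (parse_escaped_token_alt_loop parts true [] 0).2 + 2) := by
  cases parts with
  | nil => exact absurd rfl hne
  | cons p rest =>
    rw [parse_escaped_token_alt_loop, parse_escaped_token_alt_loop]
    by_cases hi : 0 ≤ PySem.Chars.find p [' ']
    · simp only [hi, if_pos]
      simp; ring
    · simp only [hi, if_false]
      rw [loopB_frame rest false (p :: ([] : List (List Char))),
          loopB_frame rest false [p]]
      simp; ring

theorem loopB_spec (n : Nat) :
    ∀ t : List Char, t.length = n →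
    parse_escaped_token_alt_loop (PySem.Chars.splitOn t [' ', ' ']) true [] 0 =
      (pvPieces t, (pvSpan t : Int)) := by
  induction n using Nat.strong_induction_on with
  | _ n ih =>
    intro t hl
    cases t with
    | nil => rw [splitOn_nil]; decide
    | cons c r =>
      by_cases hpre : [' ', ' '] <+: (c :: r)
      · -- doubled space
        obtain ⟨u, hu⟩ := hpre
        obtain ⟨hc, hr⟩ : c = ' ' ∧ r = ' ' :: u := by
          simpa using congrArg (fun l => (l.head?, l.tail)) hu.symm
        subst hc; subst hr
        rw [splitOn_sep]
        rw [parse_escaped_token_alt_loop]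
        simp only [find_nil_sp]
        norm_num
        rw [loopB_frame _ false [[]] 0]
        rw [loopB_false _ (splitOn_ne_nil u.length u rfl)]
        rw [ih u.length (by simp at hl; omega) u rfl]
        simp only [pvPieces, pvSpan, Prod.mk.injEq]
        constructor
        · simp
        · push_cast; ring
      · -- single char (incl. a lone space)
        rw [splitOn_cons c r hpre]
        obtain ⟨p0, ps, hsp⟩ : ∃ p0 ps, PySem.Chars.splitOn r [' ', ' '] = p0 :: ps := by
          cases hp : PySem.Chars.splitOn r [' ', ' '] with
          | nil => exact absurd hp (splitOn_ne_nil r.length r rfl)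
          | cons a as => exact ⟨a, as, rfl⟩
        rw [hsp]
        simp only [List.modifyHead]
        by_cases hc : c = ' '
        · -- lone space: break immediately with an empty piece
          subst hc
          rw [parse_escaped_token_alt_loop]
          simp only [find_head_sp]
          norm_num
          have hr : r = [] ∨ ∃ d r', r = d :: r' ∧ d ≠ ' ' := by
            cases r with
            | nil => exact Or.inl rfl
            | cons d r' =>
              refine Or.inr ⟨d, r', rfl, fun hd => hpre ?_⟩
              subst hd; exact ⟨r', rfl⟩
          rcases hr with rfl | ⟨d, r', rfl, hd⟩
          · simp [pvPieces, pvSpan]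
          · simp [pvPieces, pvSpan, hd]
        · -- ordinary character
          have hih := ih r.length (by simp at hl; omega) r rfl
          rw [hsp] at hih
          have hptok : pvPieces (c :: r) = (pvPieces r).modifyHead (c :: ·) := by
            cases r <;> simp [pvPieces, hc]
          have hpspan : pvSpan (c :: r) = pvSpan r + 1 := by
            cases r <;> simp [pvSpan, hc]
          rw [parse_escaped_token_alt_loop] at hih ⊢
          rw [find_cons_sp c hc p0]
          by_cases hi : 0 ≤ PySem.Chars.find p0 [' ']
          · simp only [hi, if_pos] at hih ⊢
            norm_num at hih ⊢
            have hf : (0:Int) ≤ PySem.Chars.find p0 [' '] + 1 := by omega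
            rw [if_pos hf]
            obtain ⟨h1', h2'⟩ := hih
            rw [hptok, hpspan, ← h1']
            have : (PySem.Chars.find p0 [' '] + 1).toNat
                = (PySem.Chars.find p0 [' ']).toNat + 1 := by omega
            rw [this]
            simp only [List.take_succ_cons, List.modifyHead, Prod.mk.injEq]
            constructor
            · trivial
            · push_cast; omega
          · have hneg : ¬ (0:Int) ≤ (if 0 ≤ PySem.Chars.find p0 [' ']
                then PySem.Chars.find p0 [' '] + 1 else -1) := by
              rw [if_neg hi]; omega
            rw [if_neg hneg]
            simp only [hi, if_false] at hih
            rw [loopB_frame ps false [p0] _] at hih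
            rw [loopB_frame ps false [c :: p0] _]
            rw [Prod.mk.injEq] at hih
            obtain ⟨h1', h2'⟩ := hih
            rw [hptok, hpspan, ← h1']
            simp only [List.modifyHead, Prod.mk.injEq]
            constructor
            · simp
            · simp only [List.length_cons] at h2' ⊢
              push_cast at h2' ⊢
              omega

-- ===== VERDICT (by name: the statement is the Claim_ definition above) =====
theorem parse_escaped_token_spec : Claim_equal_parse_escaped_token := by
  intro s pos _hd hpre
  unfold Spec_parse_escaped_token
  obtain ⟨p, rfl⟩ : ∃ p : Nat, pos = (p : Int) :=
    ⟨pos.toNat, by have : (0:Int) ≤ pos := hpre; omega⟩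
  rw [parse_escaped_token, parse_escaped_token_alt]
  have htail : (PySem.Str.slice s (some (p : Int)) none).toList = s.toList.drop p := by
    simp [PySem.List.slice_from_natCast]
  simp only [htail]
  rw [loopA_spec s.toList s.toList.length p [] (by omega)]
  rw [loopB_frame _ true [] _]
  rw [loopB_spec (s.toList.drop p).length _ rfl]
  have hj := pvTok_eq_join (s.toList.drop p).length (s.toList.drop p) rfl
  simp [hj]
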